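-- pv_equiv track=rewrite | github.com/Aasthaengg/IBMdataset | Python_codes/p03170/s314406393.py | mex
-- ===== SOURCE A (Python) =====
-- def mex(L):
--   L.sort()
--   ans = 0
--   for i in L:
--     if i <= ans:
--       ans += 1
--     else:
--       break
--   return ans
-- ===== SOURCE B (Python) =====
-- def mex(L):
--     # Counting instead of sorting: answer = smallest k with #{x in L : x <= k} <= k.
--     # (Does not mutate L; A sorts L in place -- return value is identical.)
--     n = len(L)
--     cnt = {}
--     acc = 0
--     for x in L:
--         if x <= 0:
--             acc += 1
--         elif x < n:
--             cnt[x] = cnt.get(x, 0) + 1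
--     for k in range(n):
--         if acc <= k:
--             return k
--         acc += cnt.get(k + 1, 0)
--     return n
-- ===== Notes on version B (the rewrite author's own statement) =====
-- stated objective: alternative
-- what changed: Replaces the sort-then-scan with a one-pass frequency dict plus a counting scan over 0..n-1, using that the answer is the smallest k with #{x in L : x <= k} <= k; no sorting, but C-level sort beats the Python-level loops, so no speed is claimed.
import Mathlib
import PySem

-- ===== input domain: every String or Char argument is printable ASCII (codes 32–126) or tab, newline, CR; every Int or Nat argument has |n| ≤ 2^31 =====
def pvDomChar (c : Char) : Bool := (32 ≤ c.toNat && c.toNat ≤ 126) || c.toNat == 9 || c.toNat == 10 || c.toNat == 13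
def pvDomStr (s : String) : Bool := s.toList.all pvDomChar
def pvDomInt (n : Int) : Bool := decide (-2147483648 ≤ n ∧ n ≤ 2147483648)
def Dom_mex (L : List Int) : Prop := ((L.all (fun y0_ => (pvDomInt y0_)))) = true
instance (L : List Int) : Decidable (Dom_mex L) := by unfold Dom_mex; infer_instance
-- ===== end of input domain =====

-- B is an alternative algorithm: a one-pass frequency count plus a counting scan
-- instead of A's sort-then-scan (answer = smallest k with #{x ∈ L : x ≤ k} ≤ k).
-- Equivalence is about the RETURN value only: A sorts L in place, B does not mutate L.

-- ===== PORT A =====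
def mexLoopA : List Int → Int → Int
  | [], ans => ans
  | i :: rest, ans => if i ≤ ans then mexLoopA rest (ans + 1) else ans

def mex (L : List Int) : Int := mexLoopA (PySem.List.sorted L (fun x => x) false) 0

-- ===== PORT B =====
def mexCountStep (n : Int) (s : PySem.Dict Int Int × Int) (x : Int) : PySem.Dict Int Int × Int :=
  if x ≤ 0 then (s.1, s.2 + 1)
  else if x < n then (s.1.insert x (s.1.getD x 0 + 1), s.2)
  else s

def mexLoopB (d : PySem.Dict Int Int) (n : Int) : List Int → Int → Int
  | [], _ => n
  | k :: ks, acc => if acc ≤ k then k else mexLoopB d n ks (acc + d.getD (k + 1) 0)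

def mex_alt (L : List Int) : Int :=
  let n : Int := (L.length : Int)
  let s := L.foldl (mexCountStep n) (PySem.Dict.empty, 0)
  mexLoopB s.1 n (PySem.List.pyRange 0 n 1) s.2

-- ===== PRECONDITION & SPEC =====
def Spec_mex (L : List Int) (out : Int) : Prop := out = mex_alt L
instance (L : List Int) (out : Int) : Decidable (Spec_mex L out) := by unfold Spec_mex; infer_instance

-- ===== CLAIM (what is proved, stated in full; the proofs are below) =====
def Claim_equal_mex : Prop := ∀ (L : List Int), Dom_mex L → Spec_mex L (mex L)

-- ===== LEMMAS AND PROOFS =====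

-- #{x ∈ L : x ≤ k}, as an Int
def cOf (L : List Int) (k : Int) : Int := (L.countP (fun x => decide (x ≤ k)) : Int)

lemma cOf_succ (L : List Int) (k : Int) :
    cOf L (k + 1) = cOf L k + (L.count (k + 1) : Int) := by
  induction L with
  | nil => simp [cOf]
  | cons x l ih =>
    simp only [cOf, List.countP_cons, List.count_cons] at *
    by_cases hx : x = k + 1
    · subst hx; simp; omega
    · by_cases h1 : x ≤ k
      · have : x ≤ k + 1 := by omega
        simp [h1, this, hx]; omega
      · have : ¬ x ≤ k + 1 := by omega
        simp [h1, this, hx]; omega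

lemma fold_snd (n : Int) :
    ∀ (L : List Int) (d : PySem.Dict Int Int) (a : Int),
      (L.foldl (mexCountStep n) (d, a)).2 = a + cOf L 0 := by
  intro L
  induction L with
  | nil => intro d a; simp [cOf]
  | cons x l ih =>
    intro d a
    simp only [List.foldl_cons, cOf, List.countP_cons]
    by_cases hx : x ≤ 0
    · simp only [mexCountStep, if_pos hx]
      rw [ih]; simp [cOf, hx]; omega
    · simp only [mexCountStep, if_neg hx]
      by_cases h2 : x < n
      · simp only [if_pos h2]; rw [ih]; simp [cOf, hx]
      · simp only [if_neg h2]; rw [ih]; simp [cOf, hx]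

lemma fold_fst (n : Int) :
    ∀ (L : List Int) (d : PySem.Dict Int Int) (a : Int) (v : Int), 0 < v → v < n →
      (L.foldl (mexCountStep n) (d, a)).1.getD v 0 = d.getD v 0 + (L.count v : Int) := by
  intro L
  induction L with
  | nil => intro d a v _ _; simp
  | cons x l ih =>
    intro d a v hv0 hvn
    simp only [List.foldl_cons, List.count_cons]
    by_cases hx : x ≤ 0
    · simp only [mexCountStep, if_pos hx]
      rw [ih _ _ _ hv0 hvn]
      have : ¬ (x = v) := by omega
      simp [this]
    · simp only [mexCountStep, if_neg hx]
      by_cases h2 : x < n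
      · simp only [if_pos h2]
        rw [ih _ _ _ hv0 hvn]
        rw [PySem.Dict.getD_insert]
        by_cases hxv : v = x
        · subst hxv; simp; omega
        · have : ¬ (x = v) := fun h => hxv h.symm
          simp [hxv, this]
      · simp only [if_neg h2]
        rw [ih _ _ _ hv0 hvn]
        have : ¬ (x = v) := by omega
        simp [this]

lemma loopA_char :
    ∀ (S : List Int), S.Pairwise (· ≤ ·) → ∀ (a : Int),
      a ≤ mexLoopA S a ∧ mexLoopA S a ≤ a + S.length ∧
      (∀ k : Int, a ≤ k → k < mexLoopA S a → k - a < cOf S k) ∧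
      (mexLoopA S a < a + S.length → cOf S (mexLoopA S a) ≤ mexLoopA S a - a) := by
  intro S
  induction S with
  | nil =>
    intro _ a
    refine ⟨le_refl _, by simp [mexLoopA], ?_, ?_⟩
    · intro k hk1 hk2; simp [mexLoopA] at hk2; omega
    · intro h; simp [mexLoopA] at h
  | cons i rest ih =>
    intro hp a
    rw [List.pairwise_cons] at hp
    obtain ⟨hall, hrest⟩ := hp
    by_cases hi : i ≤ a
    · have IH := ih hrest (a + 1)
      obtain ⟨h1, h2, h3, h4⟩ := IH
      simp only [mexLoopA, if_pos hi]
      refine ⟨by omega, by simp; omega, ?_, ?_⟩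
      · intro k hk1 hk2
        have hik : i ≤ k := by omega
        simp only [cOf, List.countP_cons, decide_eq_true_eq, if_pos hik]
        by_cases hka : k = a
        · subst hka; push_cast; omega
        · have := h3 k (by omega) hk2
          simp only [cOf] at this; push_cast at *; omega
      · intro hlt
        have hlt' : mexLoopA rest (a + 1) < a + 1 + rest.length := by
          simp at hlt; omega
        have := h4 hlt'
        have hir : i ≤ mexLoopA rest (a + 1) := by omega
        simp only [cOf, List.countP_cons, decide_eq_true_eq, if_pos hir] at *
        push_cast at *; omega
    · simp only [mexLoopA, if_neg hi]
      refine ⟨le_refl _, by simp; omega, ?_, ?_⟩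
      · intro k hk1 hk2; omega
      · intro _
        have hc : cOf (i :: rest) a = 0 := by
          simp only [cOf, List.countP_cons, decide_eq_true_eq, if_neg hi]
          have : rest.countP (fun x => decide (x ≤ a)) = 0 := by
            rw [List.countP_eq_zero]
            intro x hx
            have := hall x hx
            simp; omega
          simp [this]
        omega

lemma loopB_char (L : List Int) (d : PySem.Dict Int Int) (n : Int)
    (hn : n = (L.length : Int))
    (hd : ∀ v : Int, 0 < v → v < n → d.getD v 0 = (L.count v : Int)) :
    ∀ (m : ℕ) (j acc : Int), 0 ≤ j → j ≤ n → (n - j).toNat = m →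
      (j < n → acc = cOf L j) →
      j ≤ mexLoopB d n (PySem.List.pyRange j n 1) acc ∧
      mexLoopB d n (PySem.List.pyRange j n 1) acc ≤ n ∧
      (∀ k : Int, j ≤ k → k < mexLoopB d n (PySem.List.pyRange j n 1) acc → k < cOf L k) ∧
      (mexLoopB d n (PySem.List.pyRange j n 1) acc < n →
        cOf L (mexLoopB d n (PySem.List.pyRange j n 1) acc) ≤ mexLoopB d n (PySem.List.pyRange j n 1) acc) := by
  intro m
  induction m with
  | zero =>
    intro j acc hj0 hjn hm _
    have hjn' : j = n := by omega
    subst hjn'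
    have : PySem.List.pyRange j j 1 = [] := by
      simp
    rw [this]
    refine ⟨le_refl _, le_refl _, ?_, ?_⟩
    · intro k hk1 hk2; simp [mexLoopB] at hk2 ⊢; omega
    · intro h; simp [mexLoopB] at h
  | succ m ih =>
    intro j acc hj0 hjn hm hacc
    have hjlt : j < n := by omega
    have hacc' := hacc hjlt
    rw [PySem.List.pyRange_one_cons (by omega)]
    simp only [mexLoopB]
    by_cases hstop : acc ≤ j
    · simp only [if_pos hstop]
      refine ⟨le_refl _, by omega, ?_, ?_⟩
      · intro k hk1 hk2; omega
      · intro _; omega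
    · simp only [if_neg hstop]
      have hrec := ih (j + 1) (acc + d.getD (j + 1) 0) (by omega) (by omega) (by omega) ?_
      · obtain ⟨h1, h2, h3, h4⟩ := hrec
        refine ⟨by omega, h2, ?_, h4⟩
        intro k hk1 hk2
        by_cases hkj : k = j
        · subst hkj; omega
        · exact h3 k (by omega) hk2
      · intro hj1
        rw [hd (j + 1) (by omega) hj1, hacc', cOf_succ]

lemma mex_eq_alt (L : List Int) : mex L = mex_alt L := by
  set n : Int := (L.length : Int) with hn
  -- A side
  have hperm : (PySem.List.sorted L (fun x => x) false).Perm L := PySem.List.sorted_perm L _ _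
  have hpw : (PySem.List.sorted L (fun x => x) false).Pairwise (· ≤ ·) :=
    PySem.List.sorted_pairwise L (fun x => x)
  have hlen : ((PySem.List.sorted L (fun x => x) false).length : Int) = n := by
    rw [hn, PySem.List.length_sorted]
  have hcS : ∀ k : Int, cOf (PySem.List.sorted L (fun x => x) false) k = cOf L k := by
    intro k; simp only [cOf]; rw [hperm.countP_eq]
  have hA := loopA_char (PySem.List.sorted L (fun x => x) false) hpw 0
  obtain ⟨a1, a2, a3, a4⟩ := hA
  -- B side
  set s := L.foldl (mexCountStep n) (PySem.Dict.empty, 0) with hs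
  have hs2 : s.2 = cOf L 0 := by
    rw [hs, fold_snd]; simp
  have hs1 : ∀ v : Int, 0 < v → v < n → s.1.getD v 0 = (L.count v : Int) := by
    intro v hv0 hvn
    rw [hs, fold_fst n L PySem.Dict.empty 0 v hv0 hvn]; simp
  have hB := loopB_char L s.1 n hn hs1 (n - 0).toNat 0 s.2 (le_refl 0)
      (by rw [hn]; exact_mod_cast Int.natCast_nonneg _) rfl (fun _ => hs2)
  obtain ⟨b1, b2, b3, b4⟩ := hB
  -- both characterize the same minimum
  simp only [mex, mex_alt]
  rw [← hn, ← hs]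
  set rA := mexLoopA (PySem.List.sorted L (fun x => x) false) 0 with hra
  set rB := mexLoopB s.1 n (PySem.List.pyRange 0 n 1) s.2 with hrb
  simp only [sub_zero, zero_add, hcS] at a2 a3 a4
  rw [hlen] at a2 a4
  by_contra hne
  rcases lt_or_gt_of_ne hne with hlt | hgt
  · have h1 := a4 (by omega)
    have h2 := b3 rA a1 hlt
    omega
  · have h1 := b4 (by omega)
    have h2 := a3 rB b1 hgt
    omega

-- ===== VERDICT (by name: the statement is the Claim_ definition above) =====
theorem mex_spec : Claim_equal_mex := by
  intro L _
  unfold Spec_mex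
  exact mex_eq_alt L
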